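-- pv_equiv track=rewrite | github.com/ethyca/fides | src/fides/cli/core/filters.py | is_arn_filter_match
-- ===== SOURCE A (Python) =====
-- def is_arn_filter_match(arn: str, filter_arn: str) -> bool:
--     """
--     Returns True if the given arn matches the filter pattern. In order
--     for an arn to be a match, it must match each field separated by a
--     colon(:). If the filter pattern contains an empty field, then it is
--     treated as wildcard for that field.
--
--     Examples:
--     arn=abc:def:ghi   filter_arn=abc:def:ghi   #exact match returns True
--     arn=abc:def:ghi   filter_arn=abc::ghi      #wildcarded match returns True
--     """
--     arn_split = arn.split(":")
--     filter_arn_split = filter_arn.split(":")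
--
--     # arns of different field lenth are treated as mismatch
--     if len(arn_split) != len(filter_arn_split):
--         return False
--
--     for i in range(0, len(arn_split), 1):
--         # filter pattern with value defined can be considered for mismatch
--         if filter_arn_split[i] and filter_arn_split[i] != arn_split[i]:
--             return False
--     return True
-- ===== SOURCE B (Python) =====
-- def is_arn_filter_match(arn: str, filter_arn: str) -> bool:
--     """Recursive field-by-field matcher over the two split lists; no
--     length pre-check or index loop - the recursion itself enforces that
--     both arns have the same number of fields."""
--     def match(fs, xs):
--         if not fs or not xs:
--             return fs == xs
--         return (fs[0] == "" or fs[0] == xs[0]) and match(fs[1:], xs[1:])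
--     return match(filter_arn.split(":"), arn.split(":"))
-- ===== Notes on version B (the rewrite author's own statement) =====
-- stated objective: alternative
-- what changed: Replaces the length pre-check plus indexed range loop with a single structural recursion over the two field lists that checks wildcards and enforces equal field count at once.
import Mathlib
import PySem

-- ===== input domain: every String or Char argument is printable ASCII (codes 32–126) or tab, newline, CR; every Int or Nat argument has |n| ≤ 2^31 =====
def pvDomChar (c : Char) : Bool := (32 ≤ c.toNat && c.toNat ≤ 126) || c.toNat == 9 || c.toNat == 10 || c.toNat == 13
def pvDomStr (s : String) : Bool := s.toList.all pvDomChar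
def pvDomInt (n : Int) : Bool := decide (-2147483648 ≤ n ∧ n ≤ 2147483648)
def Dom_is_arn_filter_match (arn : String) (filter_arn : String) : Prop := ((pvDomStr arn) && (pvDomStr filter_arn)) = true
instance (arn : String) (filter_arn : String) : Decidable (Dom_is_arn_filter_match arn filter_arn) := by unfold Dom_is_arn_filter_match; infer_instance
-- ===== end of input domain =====

-- B replaces A's length pre-check and indexed range loop with one structural recursion over the two field lists (alternative decomposition, same cost).


-- ===== PORT A =====
-- the for-loop over range(0, len, 1) with early 'return False'
def loopA (arn_split filter_arn_split : List String) : List Int → Bool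
  | [] => true
  | i :: rest =>
    if PySem.List.pyGetD filter_arn_split i "" ≠ ""
        ∧ PySem.List.pyGetD filter_arn_split i "" ≠ PySem.List.pyGetD arn_split i "" then
      false
    else
      loopA arn_split filter_arn_split rest

def is_arn_filter_match (arn : String) (filter_arn : String) : Bool :=
  let arn_split := (PySem.Str.split? arn ":").getD []
  let filter_arn_split := (PySem.Str.split? filter_arn ":").getD []
  if arn_split.length ≠ filter_arn_split.length then
    false
  else
    loopA arn_split filter_arn_split (PySem.List.pyRange 0 arn_split.length 1)

-- ===== PORT B =====
-- recursion over the two field lists; the recursion enforces equal field count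
def matchFields : List String → List String → Bool
  | [], [] => true
  | [], _ :: _ => false
  | _ :: _, [] => false
  | f :: fs, x :: xs => (f == "" || f == x) && matchFields fs xs

def is_arn_filter_match_alt (arn : String) (filter_arn : String) : Bool :=
  matchFields ((PySem.Str.split? filter_arn ":").getD []) ((PySem.Str.split? arn ":").getD [])

-- ===== PRECONDITION & SPEC =====
def Spec_is_arn_filter_match (arn : String) (filter_arn : String) (out : Bool) : Prop := out = is_arn_filter_match_alt arn filter_arn
instance (arn : String) (filter_arn : String) (out : Bool) : Decidable (Spec_is_arn_filter_match arn filter_arn out) := by unfold Spec_is_arn_filter_match; infer_instance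

-- ===== CLAIM (what is proved, stated in full; the proofs are below) =====
def Claim_equal_is_arn_filter_match : Prop := ∀ (arn : String) (filter_arn : String), Dom_is_arn_filter_match arn filter_arn → Spec_is_arn_filter_match arn filter_arn (is_arn_filter_match arn filter_arn)

-- ===== LEMMAS AND PROOFS =====

-- matchFields is false on lists of different lengths
theorem matchFields_length_ne {fs xs : List String} (h : fs.length ≠ xs.length) :
    matchFields fs xs = false := by
  induction fs generalizing xs with
  | nil => cases xs with
    | nil => simp at h
    | cons x xs => simp [matchFields]
  | cons f fs ih => cases xs with
    | nil => simp [matchFields]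
    | cons x xs =>
      simp only [matchFields]
      rw [ih (by simpa using h)]
      simp

-- the indexed loop from position j equals matchFields on the dropped suffixes
theorem loopA_eq_matchFields (a f : List String) (hlen : a.length = f.length)
    (j : Nat) :
    loopA a f (PySem.List.pyRange (j : Int) (a.length : Int) 1)
      = matchFields (f.drop j) (a.drop j) := by
  by_cases hj : j < a.length
  · have hcons : PySem.List.pyRange (j : Int) (a.length : Int) 1
        = (j : Int) :: PySem.List.pyRange ((j : Int) + 1) (a.length : Int) 1 :=
      PySem.List.pyRange_one_cons (by exact_mod_cast hj)
    rw [hcons]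
    have hja : j < a.length := hj
    have hjf : j < f.length := hlen ▸ hj
    have hdropa : a.drop j = a[j] :: a.drop (j + 1) := List.drop_eq_getElem_cons hja
    have hdropf : f.drop j = f[j] :: f.drop (j + 1) := List.drop_eq_getElem_cons hjf
    have hga : PySem.List.pyGetD a (j : Int) "" = a[j] := by
      rw [PySem.List.pyGetD_eq_getElem a "" (Int.natCast_nonneg j) (by exact_mod_cast hja)]
      simp
    have hgf : PySem.List.pyGetD f (j : Int) "" = f[j] := by
      rw [PySem.List.pyGetD_eq_getElem f "" (Int.natCast_nonneg j) (by exact_mod_cast hjf)]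
      simp
    have hrec : loopA a f (PySem.List.pyRange ((j : Int) + 1) (a.length : Int) 1)
        = matchFields (f.drop (j + 1)) (a.drop (j + 1)) := by
      have := loopA_eq_matchFields a f hlen (j + 1)
      simpa [Nat.cast_add] using this
    rw [hdropa, hdropf]
    simp only [loopA, hga, hgf, matchFields, hrec]
    by_cases hfe : f[j] = ""
    · simp [hfe]
    · by_cases heq : f[j] = a[j] <;> simp [hfe, heq]
  · have hnil : PySem.List.pyRange (j : Int) (a.length : Int) 1 = [] :=
      PySem.List.pyRange_one_eq_nil (by exact_mod_cast Nat.le_of_not_lt hj)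
    have ha : a.drop j = [] := List.drop_eq_nil_of_le (Nat.le_of_not_lt hj)
    have hf : f.drop j = [] := List.drop_eq_nil_of_le (by omega)
    rw [hnil, ha, hf]
    simp [loopA, matchFields]
termination_by a.length - j

-- ===== VERDICT (by name: the statement is the Claim_ definition above) =====
theorem is_arn_filter_match_spec : Claim_equal_is_arn_filter_match := by
  intro arn filter_arn _
  unfold Spec_is_arn_filter_match is_arn_filter_match is_arn_filter_match_alt
  set a := (PySem.Str.split? arn ":").getD [] with ha
  set f := (PySem.Str.split? filter_arn ":").getD [] with hf
  by_cases hlen : a.length = f.length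
  · have := loopA_eq_matchFields a f hlen 0
    simp only [Nat.cast_zero, List.drop_zero] at this
    simp only [hlen, ne_eq, not_true_eq_false, if_false]
    rw [← hlen]
    exact this
  · simp [hlen, matchFields_length_ne (fun h => hlen h.symm)]
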